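-- pv_equiv track=rewrite | github.com/pp67yu/CodeChef | OCT2019/MARM.py | mod_seq
-- ===== SOURCE A (Python) =====
-- def mod_seq(N, K, A):
--     Q = K // N
--     R = K % N
--     # Create zip order for Q:
--     # Q_order = zip(range(N), range(N)[::-1])
--     # R_order = zip(range(R), range(N)[::-1][:R])
--
--
--     if Q == 0:
--         if R > 0:
--             R_range = zip(range(R), range(N)[::-1][:R])
--             i = 0
--             for (a, b) in R_range:
--                 A[i] = A[a] ^ A[b]
--                 i += 1
--         return A
--     else:
--         # now for the new Q - we find the pattern:
--         P = Q % 3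
--         if P == 1:
--             Q = 1
--         elif P == 2:
--             Q = 2
--         else:
--             Q = 3
--
--         # for each Q rotate xor A:
--         Q_order = zip(range(N), range(N)[::-1])
--
--         for k, (a, b) in enumerate(list(Q_order) * Q):
--             A[k%N] = A[a] ^ A[b]
--
--         # for R > 0
--         if R > 0:
--             R_range = zip(range(R), range(N)[::-1][:R])
--             j = 0
--             for (a, b) in R_range:
--                 A[j] = A[a] ^ A[b]
--                 j += 1
--
--         return A
-- ===== SOURCE B (Python) =====
-- def mod_seq(N, K, A):
--     # Closed-form per-element computation: no repeated passes, no cascaded xor chain.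
--     # One full in-place pass sends each symmetric pair (x, y) = (A[i], A[j]), i < j = N-1-i,
--     # to (x^y, x), which has period 3; the middle element of an odd-length prefix becomes 0.
--     # So the state after t = (0 if K//N == 0 else (K//N - 1) % 3 + 1) full passes is read off
--     # a 3-entry table per pair, and the trailing K%N cascade steps also have a per-index
--     # closed form (i < j: old A[i]^A[j]; i == j: 0; i > j: old A[j]) over a snapshot.
--     Q = K // N
--     R = K % N
--     t = 0 if Q == 0 else (Q - 1) % 3 + 1
--     if t:
--         snap = A[:N]
--         for i in range(N):
--             j = N - 1 - i
--             if i == j: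
--                 A[i] = 0
--             else:
--                 x, y = snap[min(i, j)], snap[max(i, j)]
--                 A[i] = ((x ^ y, y, x) if i < j else (x, x ^ y, y))[t - 1]
--     if R > 0:
--         snap = A[:N]
--         for i in range(R):
--             j = N - 1 - i
--             A[i] = 0 if i == j else (snap[i] ^ snap[j] if i < j else snap[j])
--     return A
-- ===== Notes on version B (the rewrite author's own statement) =====
-- stated objective: alternative
-- what changed: Replaces A's cascaded in-place xor passes (an enumerate over a Q-times-replicated zipped index list plus a hand-counted zip R-loop) by a closed-form per-element computation: each symmetric pair has period 3 under a full pass, so the state after all full passes is read off a 3-entry table from a snapshot, and the trailing K%N cascade steps are computed by a per-index formula over a snapshot instead of sequential xor updates.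
import Mathlib
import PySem

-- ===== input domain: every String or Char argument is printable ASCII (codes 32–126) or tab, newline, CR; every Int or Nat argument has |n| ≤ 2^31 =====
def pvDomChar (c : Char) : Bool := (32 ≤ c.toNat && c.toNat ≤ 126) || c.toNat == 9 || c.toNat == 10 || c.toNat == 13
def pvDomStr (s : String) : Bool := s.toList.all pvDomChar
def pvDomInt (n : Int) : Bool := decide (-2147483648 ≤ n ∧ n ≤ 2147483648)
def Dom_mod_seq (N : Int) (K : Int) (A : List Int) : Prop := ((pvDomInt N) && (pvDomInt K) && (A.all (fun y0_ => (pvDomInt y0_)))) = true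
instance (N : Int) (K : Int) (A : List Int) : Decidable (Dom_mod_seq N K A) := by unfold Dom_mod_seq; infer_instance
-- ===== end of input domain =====

-- B replaces A's cascaded xor passes by a closed-form per-element computation (each
-- symmetric pair has period 3 under a pass, the cascade steps have a per-index formula
-- over a snapshot); objective: alternative. Both Pythons mutate A in place; the
-- equivalence proved here is about the returned list (both return the mutated A).

-- ===== PORT A =====
-- A's loop body `A[i] = A[a] ^ A[b]` carried with an explicit counter; the pair state is (list, counter).
def aRStep (st : List Int × Int) (ab : Int × Int) : List Int × Int :=
  (st.1.set st.2.toNat (PySem.Int.bxor (PySem.List.pyGetD st.1 ab.1 0) (PySem.List.pyGetD st.1 ab.2 0)), st.2 + 1)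

def mod_seq (N : Int) (K : Int) (A : List Int) : List Int :=
  let Q := PySem.Int.floordiv K N
  let R := PySem.Int.mod K N
  if Q = 0 then
    if R > 0 then
      -- R_range = zip(range(R), range(N)[::-1][:R]); explicit counter i starting at 0
      let Rrange := (PySem.List.pyRange 0 R 1).zip (((PySem.List.pyRange 0 N 1).reverse).take R.toNat)
      (Rrange.foldl aRStep (A, 0)).1
    else A
  else
    let P := PySem.Int.mod Q 3
    let Q2 : Int := if P = 1 then 1 else if P = 2 then 2 else 3
    -- Q_order = zip(range(N), range(N)[::-1]); list(Q_order) * Q; enumerate gives k, write index k % N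
    let Qorder := (PySem.List.pyRange 0 N 1).zip ((PySem.List.pyRange 0 N 1).reverse)
    let A1 := (PySem.List.enumerate ((List.replicate Q2.toNat Qorder).flatten) 0).foldl
        (fun st kab =>
          st.set (PySem.Int.mod kab.1 N).toNat
            (PySem.Int.bxor (PySem.List.pyGetD st kab.2.1 0) (PySem.List.pyGetD st kab.2.2 0))) A
    if R > 0 then
      let Rrange := (PySem.List.pyRange 0 R 1).zip (((PySem.List.pyRange 0 N 1).reverse).take R.toNat)
      (Rrange.foldl aRStep (A1, 0)).1
    else A1

-- ===== PORT B =====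
-- Source B's t-pass loop body: per-index closed form read off the snapshot (tuple
-- `((x ^ y, y, x) if i < j else (x, x ^ y, y))[t - 1]` ported as the same case chain).
def bBody (N : Int) (t : Int) (snap : List Int) (st : List Int) (i : Int) : List Int :=
  let j := N - 1 - i
  if i = j then st.set i.toNat 0
  else
    let x := PySem.List.pyGetD snap (min i j) 0
    let y := PySem.List.pyGetD snap (max i j) 0
    st.set i.toNat
      (if i < j then (if t = 1 then PySem.Int.bxor x y else if t = 2 then y else x)
       else (if t = 1 then x else if t = 2 then PySem.Int.bxor x y else y))

-- Source B's trailing-R loop body: per-index closed form over the snapshot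
def rBody (N : Int) (snap : List Int) (st : List Int) (i : Int) : List Int :=
  let j := N - 1 - i
  st.set i.toNat
    (if i = j then 0
     else if i < j then PySem.Int.bxor (PySem.List.pyGetD snap i 0) (PySem.List.pyGetD snap j 0)
     else PySem.List.pyGetD snap j 0)

def mod_seq_alt (N : Int) (K : Int) (A : List Int) : List Int :=
  let Q := PySem.Int.floordiv K N
  let R := PySem.Int.mod K N
  let t : Int := if Q = 0 then 0 else PySem.Int.mod (Q - 1) 3 + 1
  let A1 := if t ≠ 0 then
      let snap := PySem.List.slice A none (some N)      -- A[:N]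
      (PySem.List.pyRange 0 N 1).foldl (bBody N t snap) A
    else A
  if R > 0 then
    let snap := PySem.List.slice A1 none (some N)       -- A[:N]
    (PySem.List.pyRange 0 R 1).foldl (rBody N snap) A1
  else A1

-- ===== PRECONDITION & SPEC =====
-- Pre_ excludes exactly the inputs on which Python A raises: N = 0 (ZeroDivisionError in K // N),
-- and 0 < N with len(A) < N and K ≠ 0 (IndexError reading A[N-1]). It admits every input A returns on.
def Pre_mod_seq (N : Int) (K : Int) (A : List Int) : Prop :=
  N ≠ 0 ∧ (0 < N → (N ≤ (A.length : Int) ∨ K = 0))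
instance (N : Int) (K : Int) (A : List Int) : Decidable (Pre_mod_seq N K A) := by
  unfold Pre_mod_seq; infer_instance

def pvWitness_mod_seq : Int × Int × List Int := (3, 7, [1, 2, 3])

def Spec_mod_seq (N : Int) (K : Int) (A : List Int) (out : List Int) : Prop := out = mod_seq_alt N K A
instance (N : Int) (K : Int) (A : List Int) (out : List Int) : Decidable (Spec_mod_seq N K A out) := by unfold Spec_mod_seq; infer_instance

-- ===== CLAIM (what is proved, stated in full; the proofs are below) =====
def Claim_equal_mod_seq : Prop := ∀ (N : Int) (K : Int) (A : List Int), Dom_mod_seq N K A → Pre_mod_seq N K A → Spec_mod_seq N K A (mod_seq N K A)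

-- ===== LEMMAS AND PROOFS =====

-- xor algebra over Python's infinite-two's-complement ints
lemma bxor_np (a b : Nat) : PySem.Int.bxor (a:Int) (-(b:Int)-1) = -((a^^^b : Nat):Int)-1 := by
  simp only [PySem.Int.bxor, show (-(-(b:Int)-1)-1)=(b:Int) by ring, Int.toNat_natCast]
  split_ifs <;> first | rfl | omega

lemma bxor_pn (a b : Nat) : PySem.Int.bxor (-(a:Int)-1) (b:Int) = -((a^^^b : Nat):Int)-1 := by
  simp only [PySem.Int.bxor, show (-(-(a:Int)-1)-1)=(a:Int) by ring, Int.toNat_natCast]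
  split_ifs <;> first | rfl | omega

lemma bxor_nnn (a b : Nat) : PySem.Int.bxor (-(a:Int)-1) (-(b:Int)-1) = ((a^^^b : Nat):Int) := by
  simp only [PySem.Int.bxor, show (-(-(a:Int)-1)-1)=(a:Int) by ring,
    show (-(-(b:Int)-1)-1)=(b:Int) by ring, Int.toNat_natCast]
  split_ifs <;> first | rfl | omega

lemma int_repr (x : Int) : (∃ a : Nat, x = (a:Int)) ∨ (∃ a : Nat, x = -(a:Int) - 1) := by
  rcases le_or_gt 0 x with h|h
  · exact Or.inl ⟨x.toNat, by omega⟩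
  · exact Or.inr ⟨(-x-1).toNat, by omega⟩

lemma bxor_left_cancel (x y : Int) : PySem.Int.bxor (PySem.Int.bxor x y) x = y := by
  rcases int_repr x with ⟨a, rfl⟩ | ⟨a, rfl⟩ <;> rcases int_repr y with ⟨b, rfl⟩ | ⟨b, rfl⟩ <;>
    simp [bxor_np, bxor_pn, bxor_nnn, Nat.xor_comm, Nat.xor_xor_cancel_left]

lemma bxor_right_cancel (x y : Int) : PySem.Int.bxor y (PySem.Int.bxor x y) = x := by
  rw [PySem.Int.bxor_comm, PySem.Int.bxor_comm x y, bxor_left_cancel]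

-- range/pyRange bridges
lemma rev_pyRange (N : Int) :
    (PySem.List.pyRange 0 N 1).reverse = (List.range N.toNat).map (fun (k : Nat) => N - 1 - (k : Int)) := by
  apply List.ext_getElem
  · simp [PySem.List.length_pyRange_one]
  · intro k h1 h2
    simp only [List.getElem_reverse, List.getElem_map, List.getElem_range]
    rw [PySem.List.getElem_pyRange_one]
    simp [PySem.List.length_pyRange_one] at h1 ⊢
    omega

lemma pyRange_zero_map (R : Int) :
    PySem.List.pyRange 0 R 1 = (List.range R.toNat).map (fun (k : Nat) => ((k : Int))) := by
  rw [PySem.List.pyRange_one]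
  simp

-- the zipped pair list both of A's loops iterate over, in closed form
lemma zip_closed (N R : Int) (hRN : R ≤ N) :
    (PySem.List.pyRange 0 R 1).zip (((PySem.List.pyRange 0 N 1).reverse).take R.toNat)
      = (List.range R.toNat).map (fun (k : Nat) => ((k : Int), N - 1 - (k : Int))) := by
  rw [pyRange_zero_map, rev_pyRange, ← List.map_take, List.take_range]
  have : min R.toNat N.toNat = R.toNat := by omega
  rw [this, List.zip_map']

-- A's in-place cascade step, Nat-indexed (the common denominator of all loops here)
def stepNat (n : Nat) (s : List Int) (k : Nat) : List Int :=
  s.set k (PySem.Int.bxor (s.getD k 0) (s.getD (n-1-k) 0))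

def pfold (n R : Nat) (s : List Int) : List Int := (List.range R).foldl (stepNat n) s

def bStep (N : Int) (st : List Int) (i : Int) : List Int :=
  st.set i.toNat (PySem.Int.bxor (PySem.List.pyGetD st i 0) (PySem.List.pyGetD st (N - 1 - i) 0))

lemma bStep_eq_stepNat (N : Int) (s : List Int) (k : Nat) (hk : k < N.toNat) :
    bStep N s (k : Int) = stepNat N.toNat s k := by
  unfold bStep stepNat
  have h1 : N - 1 - (k : Int) = ((N.toNat - 1 - k : Nat) : Int) := by omega
  rw [h1, PySem.List.pyGetD_natCast, PySem.List.pyGetD_natCast]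
  simp

lemma foldl_bStep_eq_pfold (N : Int) (R : Nat) (hR : R ≤ N.toNat) (s : List Int) :
    ((List.range R).map (fun (k : Nat) => ((k : Int)))).foldl (bStep N) s = pfold N.toNat R s := by
  rw [List.foldl_map]
  apply PySem.List.foldl_congr_mem
  intro acc k hk
  exact bStep_eq_stepNat N acc k (by simp at hk; omega)

-- A's counter-carrying R-loop collapses to the plain bStep fold
lemma aRfold_eq (N : Int) : ∀ (n : Nat) (st : List Int),
    ((List.range n).map (fun (k : Nat) => ((k : Int), N - 1 - (k : Int)))).foldl aRStep (st, 0)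
      = (((List.range n).map (fun (k : Nat) => ((k : Int)))).foldl (bStep N) st, (n : Int)) := by
  intro n
  induction n with
  | zero => intro st; simp
  | succ n ih =>
    intro st
    rw [List.range_succ]
    simp only [List.map_append, List.foldl_append, ih]
    simp [aRStep, bStep]

lemma enumerate_map_range {α : Type} (g : Nat → α) (n : Nat) (s : Int) :
    PySem.List.enumerate ((List.range n).map g) s
      = (List.range n).map (fun (k : Nat) => (s + (k : Int), g k)) := by
  apply List.ext_getElem
  · simp [PySem.List.length_enumerate]
  · intro k h1 h2
    simp [PySem.List.getElem_enumerate]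

-- one full pass of A's enumerated Q-loop, started at offset q*N, is a bStep pass
lemma enum_pass (N : Int) (hN : 0 < N) (q : Nat) (st : List Int) :
    (PySem.List.enumerate ((List.range N.toNat).map (fun (k : Nat) => ((k : Int), N - 1 - (k : Int)))) ((q : Int) * N)).foldl
        (fun st kab =>
          st.set (PySem.Int.mod kab.1 N).toNat
            (PySem.Int.bxor (PySem.List.pyGetD st kab.2.1 0) (PySem.List.pyGetD st kab.2.2 0))) st
      = ((List.range N.toNat).map (fun (k : Nat) => ((k : Int)))).foldl (bStep N) st := by
  rw [enumerate_map_range, List.foldl_map, List.foldl_map]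
  apply PySem.List.foldl_congr_mem
  intro acc k hk
  simp only [List.mem_range] at hk
  have hmod : PySem.Int.mod ((q : Int) * N + (k : Int)) N = (k : Int) := by
    rw [PySem.Int.mod_eq_emod_of_pos hN]
    rw [show (q : Int) * N + (k : Int) = (k : Int) + (q : Int) * N by ring, Int.add_mul_emod_self_right]
    exact Int.emod_eq_of_lt (by omega) (by omega)
  simp [hmod, bStep]

-- A's whole Q-loop = q iterations of a full bStep pass
lemma qloop_eq (N : Int) (hN : 0 < N) : ∀ (q : Nat) (st : List Int),
    (PySem.List.enumerate ((List.replicate q ((List.range N.toNat).map (fun (k : Nat) => ((k : Int), N - 1 - (k : Int))))).flatten) 0).foldl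
        (fun st kab =>
          st.set (PySem.Int.mod kab.1 N).toNat
            (PySem.Int.bxor (PySem.List.pyGetD st kab.2.1 0) (PySem.List.pyGetD st kab.2.2 0))) st
      = (fun s => ((List.range N.toNat).map (fun (k : Nat) => ((k : Int)))).foldl (bStep N) s)^[q] st := by
  intro q
  induction q with
  | zero => intro st; simp [PySem.List.enumerate_nil]
  | succ q ih =>
    intro st
    rw [List.replicate_succ', List.flatten_append, PySem.List.enumerate_append, List.foldl_append, ih]
    have hlen : (((List.replicate q ((List.range N.toNat).map (fun (k : Nat) => ((k : Int), N - 1 - (k : Int))))).flatten).length : Int)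
        = (q : Int) * N := by
      have h2 : ((List.replicate q ((List.range N.toNat).map (fun (k : Nat) => ((k : Int), N - 1 - (k : Int))))).flatten).length
          = q * N.toNat := by simp
      rw [h2]
      push_cast
      rw [Int.toNat_of_nonneg hN.le]
    simp only [List.flatten_cons, List.flatten_nil, List.append_nil]
    rw [hlen, zero_add, enum_pass N hN q, Function.iterate_succ_apply']

lemma qorder_closed (N : Int) :
    (PySem.List.pyRange 0 N 1).zip ((PySem.List.pyRange 0 N 1).reverse)
      = (List.range N.toNat).map (fun (k : Nat) => ((k : Int), N - 1 - (k : Int))) := by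
  rw [rev_pyRange, pyRange_zero_map, List.zip_map']

lemma q2_eq_passes (Q : Int) :
    (if PySem.Int.mod Q 3 = 1 then (1:Int) else if PySem.Int.mod Q 3 = 2 then 2 else 3)
      = PySem.Int.mod (Q - 1) 3 + 1 := by
  rw [PySem.Int.mod_eq_emod_of_pos (by norm_num), PySem.Int.mod_eq_emod_of_pos (by norm_num)]
  split_ifs <;> omega

lemma rpart_eq (N R : Int) (hRN : R ≤ N) (st : List Int) :
    (((PySem.List.pyRange 0 R 1).zip (((PySem.List.pyRange 0 N 1).reverse).take R.toNat)).foldl aRStep (st, 0)).1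
      = ((List.range R.toNat).map (fun (k : Nat) => ((k : Int)))).foldl (bStep N) st := by
  rw [zip_closed N R hRN, aRfold_eq]

-- ===== elementwise characterizations =====

lemma length_pfold (n R : Nat) (s : List Int) : (pfold n R s).length = s.length := by
  unfold pfold
  induction R with
  | zero => simp
  | succ R ih => rw [List.range_succ, List.foldl_append]; simp [stepNat, ih]

lemma getD_set_self (s : List Int) (k : Nat) (v : Int) (hk : k < s.length) :
    (s.set k v).getD k 0 = v := by
  simp [List.getD_eq_getElem?_getD, hk]

lemma getD_set_ne (s : List Int) (k i : Nat) (v : Int) (h : k ≠ i) :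
    (s.set k v).getD i 0 = s.getD i 0 := by
  simp [List.getD_eq_getElem?_getD, h]

-- the result of R cascade steps, per index
def pform (n R : Nat) (s : List Int) (i : Nat) : Int :=
  if i < R then
    (if i = n-1-i then 0
     else if i < n-1-i then PySem.Int.bxor (s.getD i 0) (s.getD (n-1-i) 0)
     else s.getD (n-1-i) 0)
  else s.getD i 0

lemma pfold_getD (n : Nat) (s : List Int) (hn : n ≤ s.length) :
    ∀ (R : Nat), R ≤ n → ∀ i, (pfold n R s).getD i 0 = pform n R s i := by
  intro R
  induction R with
  | zero => intro _ i; simp [pfold, pform]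
  | succ R ih =>
    intro hR i
    have hR' : R ≤ n := by omega
    have hlen : (pfold n R s).length = s.length := length_pfold n R s
    have hstep : pfold n (R+1) s = stepNat n (pfold n R s) R := by
      unfold pfold; rw [List.range_succ, List.foldl_append, List.foldl_cons, List.foldl_nil]
    rw [hstep]
    unfold stepNat
    by_cases hiR : i = R
    · subst hiR
      rw [getD_set_self _ _ _ (by rw [hlen]; omega), ih hR' i, ih hR' (n-1-i)]
      have e1 : pform n i s i = s.getD i 0 := by simp [pform]
      rw [e1]
      rcases Nat.lt_trichotomy i (n-1-i) with hlt | hmid | hgt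
      · have e2 : pform n i s (n-1-i) = s.getD (n-1-i) 0 := by
          unfold pform; rw [if_neg (by omega)]
        have e3 : pform n (i+1) s i = PySem.Int.bxor (s.getD i 0) (s.getD (n-1-i) 0) := by
          unfold pform; rw [if_pos (by omega), if_neg (by omega), if_pos hlt]
        rw [e2, e3]
      · have e2 : pform n i s (n-1-i) = s.getD (n-1-i) 0 := by
          unfold pform; rw [if_neg (by omega)]
        have e3 : pform n (i+1) s i = 0 := by
          unfold pform; rw [if_pos (by omega), if_pos hmid]
        rw [e2, e3, ← hmid]
        exact PySem.Int.bxor_self _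
      · have hji : n-1-(n-1-i) = i := by omega
        have e2 : pform n i s (n-1-i) = PySem.Int.bxor (s.getD (n-1-i) 0) (s.getD i 0) := by
          unfold pform; rw [if_pos (by omega), if_neg (by omega), if_pos (by omega), hji]
        have e3 : pform n (i+1) s i = s.getD (n-1-i) 0 := by
          unfold pform; rw [if_pos (by omega), if_neg (by omega), if_neg (by omega)]
        rw [e2, e3]
        exact bxor_right_cancel _ _
    · rw [getD_set_ne _ _ _ _ (fun h => hiR h.symm), ih hR' i]
      simp only [pform]
      split_ifs <;> first | rfl | omega

-- a fold that writes f k at position k, reading only a fixed snapshot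
lemma setfold_getD (f : Nat → Int) (s : List Int) : ∀ (m : Nat), m ≤ s.length →
    ∀ i, ((List.range m).foldl (fun st k => st.set k (f k)) s).getD i 0
      = if i < m then f i else s.getD i 0 := by
  intro m
  induction m with
  | zero => intro _ i; simp
  | succ m ih =>
    intro hm i
    rw [List.range_succ, List.foldl_append, List.foldl_cons, List.foldl_nil]
    have hlen : ((List.range m).foldl (fun st k => st.set k (f k)) s).length = s.length := by
      clear ih hm
      induction m with
      | zero => simp
      | succ m ih2 => rw [List.range_succ, List.foldl_append]; simp [ih2]
    by_cases hi : i = m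
    · subst hi
      rw [getD_set_self _ _ _ (by omega), if_pos (by omega)]
    · rw [getD_set_ne _ _ _ _ (fun h => hi h.symm), ih (by omega) i]
      by_cases h1 : i < m
      · rw [if_pos h1, if_pos (by omega)]
      · rw [if_neg h1, if_neg (by omega)]

lemma setfold_length (f : Nat → Int) (s : List Int) (m : Nat) :
    ((List.range m).foldl (fun st k => st.set k (f k)) s).length = s.length := by
  induction m with
  | zero => simp
  | succ m ih => rw [List.range_succ, List.foldl_append]; simp [ih]

lemma list_eq_of_getD (l l' : List Int) (hlen : l.length = l'.length)
    (h : ∀ i, l.getD i 0 = l'.getD i 0) : l = l' := by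
  apply List.ext_getElem hlen
  intro i h1 h2
  have := h i
  rwa [List.getD_eq_getElem l 0 h1, List.getD_eq_getElem l' 0 h2] at this

-- Source B's table for the state after t ∈ {1,2,3} full passes, per index
def tformN (n : Nat) (t : Int) (s : List Int) (k : Nat) : Int :=
  if k = n-1-k then 0
  else if k < n-1-k then
    (if t = 1 then PySem.Int.bxor (s.getD k 0) (s.getD (n-1-k) 0)
     else if t = 2 then s.getD (n-1-k) 0 else s.getD k 0)
  else
    (if t = 1 then s.getD (n-1-k) 0
     else if t = 2 then PySem.Int.bxor (s.getD (n-1-k) 0) (s.getD k 0) else s.getD k 0)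

-- one, two, three full passes, per index (in terms of the starting list)
lemma pass1_getD (n : Nat) (s : List Int) (hn : n ≤ s.length) (i : Nat) :
    (pfold n n s).getD i 0 = if i < n then tformN n 1 s i else s.getD i 0 := by
  rw [pfold_getD n s hn n (le_refl n) i]
  unfold pform tformN
  by_cases h1 : i < n
  · rw [if_pos h1, if_pos h1]
    by_cases hmid : i = n-1-i
    · rw [if_pos hmid, if_pos hmid]
    · rw [if_neg hmid, if_neg hmid]
      by_cases hlt : i < n-1-i
      · rw [if_pos hlt, if_pos hlt, if_pos rfl]
      · rw [if_neg hlt, if_neg hlt, if_pos rfl]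
  · rw [if_neg h1, if_neg h1]

lemma pass2_getD (n : Nat) (s : List Int) (hn : n ≤ s.length) (i : Nat) :
    (pfold n n (pfold n n s)).getD i 0 = if i < n then tformN n 2 s i else s.getD i 0 := by
  have hlen : n ≤ (pfold n n s).length := by rw [length_pfold]; exact hn
  rw [pass1_getD n (pfold n n s) hlen i]
  by_cases h1 : i < n
  · rw [if_pos h1, if_pos h1]
    unfold tformN
    by_cases hmid : i = n-1-i
    · rw [if_pos hmid, if_pos hmid]
    · have hji : n-1-(n-1-i) = i := by omega
      by_cases hlt : i < n-1-i
      · rw [if_neg hmid, if_neg hmid, if_pos hlt, if_pos hlt, if_pos rfl, if_neg (by norm_num),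
          if_pos rfl]
        rw [pass1_getD n s hn i, pass1_getD n s hn (n-1-i),
          if_pos h1, if_pos (by omega)]
        unfold tformN
        rw [if_neg hmid, if_pos hlt, if_pos rfl, if_neg (by omega), hji, if_neg (by omega),
          if_pos rfl]
        exact bxor_left_cancel _ _
      · rw [if_neg hmid, if_neg hmid, if_neg hlt, if_neg hlt, if_pos rfl, if_neg (by norm_num),
          if_pos rfl]
        rw [pass1_getD n s hn (n-1-i), if_pos (by omega)]
        unfold tformN
        rw [if_neg (by omega), hji, if_pos (by omega), if_pos rfl]
  · rw [if_neg h1, if_neg h1, pass1_getD n s hn i, if_neg h1]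

lemma pass3_getD (n : Nat) (s : List Int) (hn : n ≤ s.length) (i : Nat) :
    (pfold n n (pfold n n (pfold n n s))).getD i 0 = if i < n then tformN n 3 s i else s.getD i 0 := by
  have hlen2 : n ≤ (pfold n n (pfold n n s)).length := by rw [length_pfold, length_pfold]; exact hn
  have hlen1 : n ≤ (pfold n n s).length := by rw [length_pfold]; exact hn
  rw [pass1_getD n (pfold n n (pfold n n s)) hlen2 i]
  by_cases h1 : i < n
  · rw [if_pos h1, if_pos h1]
    unfold tformN
    by_cases hmid : i = n-1-i
    · rw [if_pos hmid, if_pos hmid]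
    · have hji : n-1-(n-1-i) = i := by omega
      by_cases hlt : i < n-1-i
      · rw [if_neg hmid, if_neg hmid, if_pos hlt, if_pos hlt, if_pos rfl,
          if_neg (by norm_num), if_neg (by norm_num)]
        rw [pass2_getD n s hn i, pass2_getD n s hn (n-1-i), if_pos h1, if_pos (by omega)]
        unfold tformN
        rw [if_neg hmid, if_pos hlt, if_neg (by norm_num), if_pos rfl, if_neg (by omega), hji,
          if_neg (by omega), if_neg (by norm_num), if_pos rfl]
        exact bxor_right_cancel _ _
      · rw [if_neg hmid, if_neg hmid, if_neg hlt, if_neg hlt, if_pos rfl,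
          if_neg (by norm_num), if_neg (by norm_num)]
        rw [pass2_getD n s hn (n-1-i), if_pos (by omega)]
        unfold tformN
        rw [if_neg (by omega), hji, if_pos (by omega), if_neg (by norm_num), if_pos rfl]
  · rw [if_neg h1, if_neg h1, pass2_getD n s hn i, if_neg h1]

-- snapshot reads are reads of the underlying list, in range
lemma getD_take (s : List Int) (n k : Nat) (hk : k < n) :
    (s.take n).getD k 0 = s.getD k 0 := by
  simp only [List.getD_eq_getElem?_getD]
  rw [List.getElem?_take_of_lt hk]

-- B's t-block fold, reduced to a plain set-fold of the tformN table
lemma bBody_fold_eq (N : Int) (hpos : 0 < N) (t : Int) (A : List Int) :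
    (PySem.List.pyRange 0 N 1).foldl (bBody N t (PySem.List.slice A none (some N))) A
      = (List.range N.toNat).foldl (fun st k => st.set k (tformN N.toNat t A k)) A := by
  rw [pyRange_zero_map, List.foldl_map]
  apply PySem.List.foldl_congr_mem
  intro acc k hk
  simp only [List.mem_range] at hk
  have hsnap : PySem.List.slice A none (some N) = A.take N.toNat :=
    PySem.List.slice_to A hpos.le
  set n := N.toNat with hn
  have hj : N - 1 - (k : Int) = ((n-1-k : Nat) : Int) := by omega
  unfold bBody tformN
  simp only [hsnap, hj, ← Nat.cast_min, ← Nat.cast_max, PySem.List.pyGetD_natCast,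
    Int.toNat_natCast, Nat.cast_lt, Nat.cast_inj]
  by_cases hmid : k = n-1-k
  · rw [if_pos hmid, if_pos hmid]
  · rw [if_neg hmid, if_neg hmid]
    congr 1
    by_cases hlt : k < n-1-k
    · rw [if_pos hlt, if_pos hlt, Nat.min_eq_left hlt.le, Nat.max_eq_right hlt.le,
        getD_take A n k (by omega), getD_take A n (n-1-k) (by omega)]
    · rw [if_neg hlt, if_neg hlt, Nat.min_eq_right (by omega), Nat.max_eq_left (by omega),
        getD_take A n k (by omega), getD_take A n (n-1-k) (by omega)]

-- B's trailing-R fold on s equals A's R cascade steps on s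
lemma rBody_fold_eq (N R : Int) (hpos : 0 < N) (_hR0 : 0 ≤ R) (hRN : R ≤ N) (s : List Int)
    (hlen : N.toNat ≤ s.length) :
    (PySem.List.pyRange 0 R 1).foldl (rBody N (PySem.List.slice s none (some N))) s
      = pfold N.toNat R.toNat s := by
  set n := N.toNat with hn
  have hsnap : PySem.List.slice s none (some N) = s.take n := PySem.List.slice_to s hpos.le
  have hstep : (PySem.List.pyRange 0 R 1).foldl (rBody N (PySem.List.slice s none (some N))) s
      = (List.range R.toNat).foldl
          (fun st k => st.set k
            (if k = n-1-k then 0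
             else if k < n-1-k then PySem.Int.bxor (s.getD k 0) (s.getD (n-1-k) 0)
             else s.getD (n-1-k) 0)) s := by
    rw [pyRange_zero_map, List.foldl_map]
    apply PySem.List.foldl_congr_mem
    intro acc k hk
    simp only [List.mem_range] at hk
    have hkn : k < n := by omega
    have hj : N - 1 - (k : Int) = ((n-1-k : Nat) : Int) := by omega
    unfold rBody
    simp only [hsnap, hj, PySem.List.pyGetD_natCast, Int.toNat_natCast,
      Nat.cast_lt, Nat.cast_inj, getD_take s n k hkn, getD_take s n (n-1-k) (by omega)]
  rw [hstep]
  apply list_eq_of_getD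
  · rw [setfold_length, length_pfold]
  · intro i
    rw [setfold_getD _ s R.toNat (by omega) i,
      pfold_getD n s hlen R.toNat (by omega) i]
    unfold pform
    rfl

-- B's t-block equals t iterations of a full cascade pass, for t ∈ {1,2,3}
lemma tpass_eq (N : Int) (hpos : 0 < N) (t : Int) (ht : t = 1 ∨ t = 2 ∨ t = 3) (A : List Int)
    (hlen : N.toNat ≤ A.length) :
    (fun s => pfold N.toNat N.toNat s)^[t.toNat] A
      = (PySem.List.pyRange 0 N 1).foldl (bBody N t (PySem.List.slice A none (some N))) A := by
  rw [bBody_fold_eq N hpos t A]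
  set n := N.toNat with hn
  apply list_eq_of_getD
  · rcases ht with rfl | rfl | rfl <;>
      simp [Function.iterate_succ_apply', length_pfold, setfold_length]
  · intro i
    rw [setfold_getD _ A n hlen i]
    rcases ht with rfl | rfl | rfl
    · show (pfold n n A).getD i 0 = _
      rw [pass1_getD n A hlen i]
    · show (pfold n n ((fun s => pfold n n s)^[1] A)).getD i 0 = _
      show (pfold n n (pfold n n A)).getD i 0 = _
      rw [pass2_getD n A hlen i]
    · show (pfold n n ((fun s => pfold n n s)^[2] A)).getD i 0 = _
      show (pfold n n (pfold n n (pfold n n A))).getD i 0 = _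
      rw [pass3_getD n A hlen i]

-- ===== VERDICT =====
theorem mod_seq_spec : Claim_equal_mod_seq := by
  intro N K A _ hPre
  obtain ⟨hN0, hLen⟩ := hPre
  unfold Spec_mod_seq
  rcases lt_or_gt_of_ne hN0 with hneg | hpos
  · -- N < 0: every loop range is empty, both return A
    unfold mod_seq mod_seq_alt
    have hRle : PySem.Int.mod K N ≤ 0 := (PySem.Int.mod_neg_bounds (a := K) hneg).2
    have h1 : PySem.List.pyRange 0 N 1 = [] := PySem.List.pyRange_one_eq_nil (by omega)
    have h2 : PySem.List.pyRange 0 (PySem.Int.mod K N) 1 = [] := PySem.List.pyRange_one_eq_nil (by omega)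
    simp [h1, h2]
  · -- N > 0
    have hR0 : 0 ≤ PySem.Int.mod K N := PySem.Int.mod_nonneg (a := K) hpos
    have hRN : PySem.Int.mod K N < N := PySem.Int.mod_lt (a := K) hpos
    by_cases hK : K = 0
    · -- K = 0: Q = R = 0, both sides return A untouched
      subst hK
      have hQ : PySem.Int.floordiv 0 N = 0 := by
        rw [PySem.Int.floordiv_eq_ediv_of_pos hpos, Int.zero_ediv]
      have hR : PySem.Int.mod 0 N = 0 := by
        rw [PySem.Int.mod_eq_emod_of_pos hpos, Int.zero_emod]
      simp [mod_seq, mod_seq_alt, hQ, hR]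
    · have hlen : N ≤ (A.length : Int) := (hLen hpos).resolve_right hK
      have hlenN : N.toNat ≤ A.length := by omega
      simp only [mod_seq, mod_seq_alt]
      by_cases hQ : PySem.Int.floordiv K N = 0
      · -- Q = 0: t = 0, only the R-part runs on both sides
        simp only [hQ, reduceIte, ne_eq, not_true_eq_false]
        by_cases hRpos : PySem.Int.mod K N > 0
        · rw [if_pos hRpos, if_pos hRpos, rpart_eq N _ hRN.le,
            foldl_bStep_eq_pfold N _ (by omega),
            rBody_fold_eq N _ hpos hR0 hRN.le A hlenN]
        · rw [if_neg hRpos, if_neg hRpos]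
      · -- Q ≠ 0
        rw [if_neg hQ, if_neg hQ, qorder_closed, qloop_eq N hpos]
        have hpass : (if PySem.Int.mod (PySem.Int.floordiv K N) 3 = 1 then (1:Int)
            else if PySem.Int.mod (PySem.Int.floordiv K N) 3 = 2 then 2 else 3)
            = PySem.Int.mod (PySem.Int.floordiv K N - 1) 3 + 1 := q2_eq_passes _
        rw [hpass]
        set t : Int := PySem.Int.mod (PySem.Int.floordiv K N - 1) 3 + 1 with hti
        have ht3 : t = 1 ∨ t = 2 ∨ t = 3 := by
          have h1 : 0 ≤ PySem.Int.mod (PySem.Int.floordiv K N - 1) 3 := PySem.Int.mod_nonneg (a := PySem.Int.floordiv K N - 1) (by norm_num)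
          have h2 : PySem.Int.mod (PySem.Int.floordiv K N - 1) 3 < 3 := PySem.Int.mod_lt (a := PySem.Int.floordiv K N - 1) (by norm_num)
          omega
        have htne : t ≠ 0 := by rcases ht3 with h | h | h <;> rw [h] <;> norm_num
        rw [if_pos htne]
        have hfun : (fun s => ((List.range N.toNat).map (fun (k : Nat) => ((k : Int)))).foldl (bStep N) s)
            = (fun s => pfold N.toNat N.toNat s) := by
          funext s; exact foldl_bStep_eq_pfold N N.toNat (le_refl _) s
        rw [hfun, tpass_eq N hpos t ht3 A hlenN]
        set B1 := (PySem.List.pyRange 0 N 1).foldl (bBody N t (PySem.List.slice A none (some N))) A with hB1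
        have hB1len : N.toNat ≤ B1.length := by
          rw [hB1, bBody_fold_eq N hpos t A, setfold_length]; exact hlenN
        by_cases hRpos : PySem.Int.mod K N > 0
        · rw [if_pos hRpos, if_pos hRpos, rpart_eq N _ hRN.le,
            foldl_bStep_eq_pfold N _ (by omega),
            rBody_fold_eq N _ hpos hR0 hRN.le B1 hB1len]
        · rw [if_neg hRpos, if_neg hRpos]
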